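-- pv_equiv track=rewrite | github.com/DaeWon9/PS | 프로그래머스/2/389480. 완전범죄/완전범죄.py | solution
-- ===== SOURCE A (Python) =====
-- def solution(info, n, m):
--     info_len = len(info)
--     INF = 2147483647
--
--     dp = [[INF for i in range(m)] for _ in range(info_len+1)]
--     dp[0][0] = 0
--
--     for i in range(info_len):
--         a, b = info[i]
--         dp_idx = i+1
--
--         for bb in range(m-1, -1, -1):
--             if (bb < b):
--                 dp[dp_idx][bb] = dp[dp_idx-1][bb] + a # a가 훔치는 경우
--                 continue
--
--             dp[dp_idx][bb] = min(
--                 dp[dp_idx-1][bb] + a, # a가 훔치는 경우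
--                 dp[dp_idx-1][bb-b], # b가 훔치는 경우
--             )
--
--
--     answer = min(dp[-1])
--
--     return answer if answer < n else -1  # 불가능하면 -1 반환
-- ===== SOURCE B (Python) =====
-- def solution(info, n, m):
--     # Complement view: minimizing A-robot's stolen cost == maximizing the cost
--     # handed to B within its trace budget m-1, via a 0/1 knapsack with
--     # "weight <= j" semantics; answer = total cost minus the best saving.
--     total_a = sum(a for a, _ in info)
--     best = [0] * m  # best[j] = max a-sum assignable to B using at most j trace
--     for a, b in info:
--         best = [best[j] if j < b else max(best[j], best[j - b] + a)
--                 for j in range(m)]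
--     ans = total_a - best[-1]
--     return ans if ans < n else -1
-- ===== Notes on version B (the rewrite author's own statement) =====
-- stated objective: alternative
-- what changed: Replaces A's direct cost-minimization DP (a full (len+1) x m min-table with an INF sentinel and a descending index loop) by its complement: a 0/1 maximization knapsack over the trace budget (best saving handed to B, rebuilt per item by a forward comprehension, no INF), returning total cost minus the best saving.
import Mathlib
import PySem

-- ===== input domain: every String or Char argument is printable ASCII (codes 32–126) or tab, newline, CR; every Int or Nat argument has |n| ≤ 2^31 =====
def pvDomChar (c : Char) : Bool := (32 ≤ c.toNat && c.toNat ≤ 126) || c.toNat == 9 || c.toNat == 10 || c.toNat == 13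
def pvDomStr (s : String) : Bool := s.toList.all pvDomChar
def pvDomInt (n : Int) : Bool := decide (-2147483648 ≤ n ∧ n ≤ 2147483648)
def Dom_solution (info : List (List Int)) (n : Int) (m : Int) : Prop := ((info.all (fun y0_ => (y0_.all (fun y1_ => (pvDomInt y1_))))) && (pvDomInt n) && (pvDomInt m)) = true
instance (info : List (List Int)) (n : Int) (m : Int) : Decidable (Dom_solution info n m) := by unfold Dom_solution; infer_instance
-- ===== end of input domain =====

-- B recasts A's direct min-cost DP (full (len+1) x m INF-sentinel table, descending index loop)
-- as its complement: a 0/1 maximization knapsack over the trace budget, answer = total - best saving.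

-- ===== PORT A =====
-- helper: Python `l[j] = v` on a list of ints; exact for the in-range indices A uses (Pre_ excludes the raising inputs)
def pySet1 (l : List Int) (j : Int) (v : Int) : List Int :=
  if 0 ≤ j ∧ j < (l.length : Int) then l.set j.toNat v else l

-- helper: Python `dp[i][j] = v`; exact for the in-range nonnegative indices A uses on Pre_
def pySet2 (dp : List (List Int)) (i j v : Int) : List (List Int) :=
  if 0 ≤ i ∧ i < (dp.length : Int) then dp.set i.toNat (pySet1 (dp.getD i.toNat []) j v) else dp

-- helper: Python `dp[i][j]` (read); the defaults are never reached on Pre_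
def pyGet2 (dp : List (List Int)) (i j : Int) : Int :=
  PySem.List.pyGetD (PySem.List.pyGetD dp i []) j 0

-- the body of A's inner `for bb in range(m-1, -1, -1)` loop, branches in source order
def aBody (a b dpIdx : Int) (dp : List (List Int)) (bb : Int) : List (List Int) :=
  if bb < b then
    pySet2 dp dpIdx bb (pyGet2 dp (dpIdx - 1) bb + a)
  else
    pySet2 dp dpIdx bb (min (pyGet2 dp (dpIdx - 1) bb + a) (pyGet2 dp (dpIdx - 1) (bb - b)))

-- the body of A's outer `for i in range(info_len)` loop
def aOuterBody (info : List (List Int)) (m : Int) (dp : List (List Int)) (i : Int) : List (List Int) :=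
  let r := PySem.List.pyGetD info i []        -- a, b = info[i] (rows have length 2 on Pre_)
  let a := PySem.List.pyGetD r 0 0
  let b := PySem.List.pyGetD r 1 0
  let dpIdx := i + 1
  (PySem.List.pyRange (m - 1) (-1) (-1)).foldl (aBody a b dpIdx) dp

def solution (info : List (List Int)) (n : Int) (m : Int) : Int :=
  let infoLen : Int := info.length
  let INF : Int := 2147483647
  let dp : List (List Int) :=
    (PySem.List.pyRange 0 (infoLen + 1) 1).map (fun _ => (PySem.List.pyRange 0 m 1).map (fun _ => INF))
  let dp := pySet2 dp 0 0 0
  let dp := (PySem.List.pyRange 0 infoLen 1).foldl (aOuterBody info m) dp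
  let answer := (PySem.List.min? (PySem.List.pyGetD dp (-1) []) (fun x => x)).getD 0   -- min(dp[-1]); nonempty on Pre_
  if answer < n then answer else -1

-- ===== PORT B =====
-- B's per-item step: the knapsack row rebuilt by the comprehension `[... for j in range(m)]`
def bKnapStep (m : Int) (best item : List Int) : List Int :=
  let a := PySem.List.pyGetD item 0 0
  let b := PySem.List.pyGetD item 1 0
  (PySem.List.pyRange 0 m 1).map (fun j =>
    if j < b then PySem.List.pyGetD best j 0
    else max (PySem.List.pyGetD best j 0) (PySem.List.pyGetD best (j - b) 0 + a))

def solution_alt (info : List (List Int)) (n : Int) (m : Int) : Int :=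
  let totalA : Int := (info.map (fun r => PySem.List.pyGetD r 0 0)).sum   -- sum(a for a, _ in info)
  let best0 : List Int := List.replicate m.toNat 0                        -- [0] * m
  let best := info.foldl (bKnapStep m) best0
  let ans := totalA - PySem.List.pyGetD best (-1) 0                       -- best[-1]; in range on Pre_
  if ans < n then ans else -1

-- ===== PRECONDITION & SPEC =====
-- Pre_ excludes exactly the inputs on which A raises: m ≤ 0 (IndexError on dp[0][0]), a row whose
-- length is not 2 (ValueError on unpacking), or a negative second row component (IndexError on dp[i][bb-b]).
def Pre_solution (info : List (List Int)) (n : Int) (m : Int) : Prop :=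
  1 ≤ m ∧ ∀ r ∈ info, r.length = 2 ∧ 0 ≤ r.getD 1 0
instance (info : List (List Int)) (n : Int) (m : Int) : Decidable (Pre_solution info n m) := by
  unfold Pre_solution; infer_instance
def pvWitness_solution : List (List Int) × Int × Int := ([[3, 1], [2, 2]], 4, 4)

def Spec_solution (info : List (List Int)) (n : Int) (m : Int) (out : Int) : Prop := out = solution_alt info n m
instance (info : List (List Int)) (n : Int) (m : Int) (out : Int) : Decidable (Spec_solution info n m out) := by unfold Spec_solution; infer_instance

-- ===== CLAIM (what is proved, stated in full; the proofs are below) =====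
def Claim_equal_solution : Prop := ∀ (info : List (List Int)) (n : Int) (m : Int), Dom_solution info n m → Pre_solution info n m → Spec_solution info n m (solution info n m)

-- ===== LEMMAS AND PROOFS =====

-- the pointwise value A's inner loop computes for the next row
def stepFun (row : List Int) (a b : Int) : List Int :=
  (List.range row.length).map (fun (bb : Nat) =>
    if (bb : Int) < b then row.getD bb 0 + a
    else min (row.getD bb 0 + a) (row.getD (bb - b.toNat) 0))

-- A's per-item row step, as a fold step over info
def aStep (row item : List Int) : List Int :=
  stepFun row (PySem.List.pyGetD item 0 0) (PySem.List.pyGetD item 1 0)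

-- the pointwise value B's comprehension computes
def bStepFun (best : List Int) (a b : Int) : List Int :=
  (List.range best.length).map (fun (j : Nat) =>
    if (j : Int) < b then best.getD j 0
    else max (best.getD j 0) (best.getD (j - b.toNat) 0 + a))

theorem length_stepFun (row : List Int) (a b : Int) : (stepFun row a b).length = row.length := by
  simp [stepFun]

theorem length_bStepFun (best : List Int) (a b : Int) : (bStepFun best a b).length = best.length := by
  simp [bStepFun]

theorem map_range_getD (l : List Int) : (List.range l.length).map (fun i => l.getD i 0) = l := by
  apply List.ext_getElem (by simp)
  intro i h1 h2
  simp [List.getD_eq_getElem?_getD, List.getElem?_eq_getElem h2]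

-- B's port step is bStepFun when the row has length m and b ≥ 0
theorem bKnapStep_eq_bStepFun (m : Int) (best item : List Int)
    (hm : best.length = m.toNat) (hm0 : 0 ≤ m) (hb : 0 ≤ PySem.List.pyGetD item 1 0) :
    bKnapStep m best item = bStepFun best (PySem.List.pyGetD item 0 0) (PySem.List.pyGetD item 1 0) := by
  unfold bKnapStep bStepFun
  set a := PySem.List.pyGetD item 0 0
  set b := PySem.List.pyGetD item 1 0
  rw [PySem.List.pyRange_one]
  rw [List.map_map, hm]
  rw [show (m - 0).toNat = m.toNat by omega]
  apply List.map_congr_left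
  intro j hj
  simp only [List.mem_range] at hj
  simp only [Function.comp]
  rw [show ((0 : Int) + (j : Int)) = ((j : Int)) by ring]
  by_cases hc : (j : Int) < b
  · rw [if_pos hc, if_pos hc, PySem.List.pyGetD_natCast]
  · rw [if_neg hc, if_neg hc, PySem.List.pyGetD_natCast]
    rw [show ((j : Int) - b) = (((j - b.toNat : Nat)) : Int) by omega, PySem.List.pyGetD_natCast]

-- one write of A's inner loop, in terms of List.set
theorem aBody_eq (a b : Int) (hb : 0 ≤ b) (j : Nat) (dp : List (List Int)) (hj : j + 1 < dp.length)
    (bb : Nat) (hbbm : bb < (dp.getD (j+1) []).length) (hprev : bb < (dp.getD j []).length) :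
    aBody a b ((j : Int) + 1) dp (bb : Int) =
      dp.set (j+1) ((dp.getD (j+1) []).set bb
        (if (bb : Int) < b then (dp.getD j []).getD bb 0 + a
         else min ((dp.getD j []).getD bb 0 + a) ((dp.getD j []).getD (bb - b.toNat) 0))) := by
  have e1 : ((j : Int) + 1 - 1) = (j : Int) := by ring
  have e2 : ((j : Int) + 1) = ((j + 1 : Nat) : Int) := by push_cast; ring
  unfold aBody pyGet2 pySet2 pySet1
  rw [e1, e2]
  simp only [Int.toNat_natCast, PySem.List.pyGetD_natCast]
  have h1 : (0 ≤ ((j + 1 : Nat) : Int) ∧ ((j + 1 : Nat) : Int) < (dp.length : Int)) :=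
    ⟨by positivity, by exact_mod_cast hj⟩
  have h2 : (0 ≤ (bb : Int) ∧ (bb : Int) < ((dp.getD (j+1) []).length : Int)) :=
    ⟨by positivity, by exact_mod_cast hbbm⟩
  by_cases hc : (bb : Int) < b
  · simp only [if_pos hc, if_pos h1, if_pos h2]
  · simp only [if_neg hc, if_pos h1, if_pos h2]
    have e3 : ((bb : Int) - b) = (((bb - b.toNat : Nat)) : Int) := by omega
    rw [e3]
    simp only [PySem.List.pyGetD_natCast]

-- A's inner countdown loop writes stepFun-values of the previous row into row j+1
theorem aInner_loop (a b : Int) (hb : 0 ≤ b) (m : Nat) (j : Nat) :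
    ∀ (t : Nat) (dp : List (List Int)), t ≤ m →
      j + 1 < dp.length → (dp.getD (j+1) []).length = m → (dp.getD j []).length = m →
      (PySem.List.pyRange ((t : Int) - 1) (-1) (-1)).foldl (aBody a b ((j : Int) + 1)) dp =
        dp.set (j+1) ((List.range m).map (fun (bb : Nat) =>
          if (bb : Int) ≤ (t : Int) - 1 then
            (if (bb : Int) < b then (dp.getD j []).getD bb 0 + a
             else min ((dp.getD j []).getD bb 0 + a) ((dp.getD j []).getD (bb - b.toNat) 0))
          else (dp.getD (j+1) []).getD bb 0)) := by
  intro t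
  induction t with
  | zero =>
    intro dp ht hj hlen1 hlen0
    rw [show ((0 : Nat) : Int) - 1 = (-1 : Int) by norm_num,
      PySem.List.pyRange_neg_one_eq_nil (by norm_num)]
    simp only [List.foldl_nil]
    have hmap : (List.range m).map (fun (bb : Nat) =>
        if (bb : Int) ≤ -1 then
          (if (bb : Int) < b then (dp.getD j []).getD bb 0 + a
           else min ((dp.getD j []).getD bb 0 + a) ((dp.getD j []).getD (bb - b.toNat) 0))
        else (dp.getD (j+1) []).getD bb 0) =
        (List.range m).map (fun (bb : Nat) => (dp.getD (j+1) []).getD bb 0) :=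
      List.map_congr_left (by intro bb hbb; rw [if_neg (by omega)])
    rw [hmap, ← hlen1, map_range_getD, List.getD_eq_getElem _ _ hj, List.set_getElem_self]
  | succ t ih =>
    intro dp ht hj hlen1 hlen0
    have e4 : (((t + 1 : Nat)) : Int) - 1 = (t : Int) := by push_cast; ring
    rw [e4, PySem.List.pyRange_neg_one_cons (by omega), List.foldl_cons]
    rw [aBody_eq a b hb j dp hj t (by omega) (by omega)]
    set val : Nat → Int := fun bb =>
      if (bb : Int) < b then (dp.getD j []).getD bb 0 + a
      else min ((dp.getD j []).getD bb 0 + a) ((dp.getD j []).getD (bb - b.toNat) 0) with hval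
    set dp' := dp.set (j+1) ((dp.getD (j+1) []).set t (val t)) with hdp'
    have hj' : j + 1 < dp'.length := by simpa [hdp'] using hj
    have hg1 : dp'.getD (j+1) [] = (dp.getD (j+1) []).set t (val t) := by
      rw [hdp', List.getD_eq_getElem _ _ (by simpa using hj)]
      simp
    have hg0 : dp'.getD j [] = dp.getD j [] := by
      rw [hdp']
      simp [List.getD_eq_getElem?_getD, List.getElem?_set_ne (by omega : j + 1 ≠ j)]
    have ih' := ih dp' (by omega) hj' (by rw [hg1]; simpa using hlen1) (by rw [hg0]; exact hlen0)
    rw [ih', hg1, hg0, hdp', List.set_set]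
    congr 1
    apply List.map_congr_left
    intro bb hbb
    simp only [List.mem_range] at hbb
    by_cases h1 : (bb : Int) ≤ (t : Int) - 1
    · rw [if_pos h1, if_pos (show (bb : Int) ≤ (t : Int) by omega)]
    · rw [if_neg h1]
      by_cases h2 : bb = t
      · subst h2
        rw [if_pos (le_refl ((bb : Int)))]
        rw [List.getD_eq_getElem _ _ (by rw [List.length_set, hlen1]; omega)]
        simp [hval]
      · rw [if_neg (show ¬ (bb : Int) ≤ (t : Int) by omega)]
        rw [List.getD_eq_getElem _ _ (by rw [List.length_set, hlen1]; omega),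
          List.getElem_set_ne (by omega)]
        exact (List.getD_eq_getElem _ _ (by omega)).symm

-- A's outer loop carries the per-item row step aStep in row k of the table
theorem aOuter_loop (m : Nat) (info : List (List Int)) (r0 : List Int)
    (hpre : ∀ r ∈ info, r.length = 2 ∧ 0 ≤ r.getD 1 0) :
    ∀ (fuel k : Nat) (dp : List (List Int)), info.length - k ≤ fuel → k ≤ info.length →
      dp.length = info.length + 1 → (∀ r ∈ dp, r.length = m) →
      dp.getD k [] = (info.take k).foldl aStep r0 →
      ((PySem.List.pyRange (k : Int) (info.length : Int) 1).foldl (aOuterBody info (m : Int)) dp).getD info.length []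
        = info.foldl aStep r0 := by
  intro fuel
  induction fuel with
  | zero =>
    intro k dp hfuel hk hlen hrows hrow
    have hkl : k = info.length := by omega
    subst hkl
    rw [PySem.List.pyRange_one_eq_nil (le_refl _), List.foldl_nil, hrow, List.take_length]
  | succ fuel ih =>
    intro k dp hfuel hk hlen hrows hrow
    by_cases hkl : k = info.length
    · subst hkl
      rw [PySem.List.pyRange_one_eq_nil (le_refl _), List.foldl_nil, hrow, List.take_length]
    · have hklt : k < info.length := by omega
      rw [PySem.List.pyRange_one_cons (by exact_mod_cast hklt), List.foldl_cons]
      have hr : PySem.List.pyGetD info (k : Int) [] = info[k] := by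
        rw [PySem.List.pyGetD_natCast, List.getD_eq_getElem _ _ hklt]
      have hmem : info[k] ∈ info := List.getElem_mem hklt
      obtain ⟨hr2, hrb⟩ := hpre info[k] hmem
      have hb : 0 ≤ PySem.List.pyGetD info[k] 1 0 := by
        rw [PySem.List.pyGetD_ofNat']; exact hrb
      have hjlt : k + 1 < dp.length := by omega
      have hlen1 : (dp.getD (k+1) []).length = m := by
        rw [List.getD_eq_getElem _ _ hjlt]; exact hrows _ (List.getElem_mem hjlt)
      have hlen0 : (dp.getD k []).length = m := by
        rw [List.getD_eq_getElem _ _ (by omega)]; exact hrows _ (List.getElem_mem (by omega))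
      have hbody : aOuterBody info (m : Int) dp (k : Int) = dp.set (k+1) (aStep (dp.getD k []) info[k]) := by
        unfold aOuterBody
        rw [hr]
        have := aInner_loop (PySem.List.pyGetD info[k] 0 0) (PySem.List.pyGetD info[k] 1 0) hb m k m
          dp (le_refl m) (by exact_mod_cast hjlt) hlen1 hlen0
        rw [this]
        congr 1
        unfold aStep stepFun
        rw [hlen0]
        apply List.map_congr_left
        intro bb hbb
        simp only [List.mem_range] at hbb
        rw [if_pos (show (bb : Int) ≤ (m : Int) - 1 by omega)]
      rw [hbody]
      have hstep : aStep (dp.getD k []) info[k] = (info.take (k+1)).foldl aStep r0 := by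
        rw [hrow, List.take_add_one, List.getElem?_eq_getElem hklt, List.foldl_append]
        simp
      have hlenb : (aStep (dp.getD k []) info[k]).length = m := by
        rw [aStep, length_stepFun, hlen0]
      have := ih (k+1) (dp.set (k+1) (aStep (dp.getD k []) info[k])) (by omega) (by omega)
        (by simpa using hlen)
        (by intro r hrmem
            rcases List.mem_or_eq_of_mem_set hrmem with h | h
            · exact hrows r h
            · rw [h]; exact hlenb)
        (by rw [List.getD_eq_getElem _ _ (by simpa using hjlt)]
            simpa using hstep)
      rw [show ((k : Int) + 1) = ((k + 1 : Nat) : Int) by push_cast; ring]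
      exact this

theorem length_aBody (a b idx : Int) (dp : List (List Int)) (bb : Int) :
    (aBody a b idx dp bb).length = dp.length := by
  unfold aBody pySet2
  split_ifs <;> simp

theorem length_foldl_aBody (a b idx : Int) (l : List Int) :
    ∀ dp : List (List Int), (l.foldl (aBody a b idx) dp).length = dp.length := by
  induction l with
  | nil => intro dp; rfl
  | cons x xs ih => intro dp; rw [List.foldl_cons, ih, length_aBody]

theorem length_foldl_aOuterBody (info : List (List Int)) (m : Int) (l : List Int) :
    ∀ dp : List (List Int), (l.foldl (aOuterBody info m) dp).length = dp.length := by
  induction l with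
  | nil => intro dp; rfl
  | cons x xs ih =>
    intro dp
    rw [List.foldl_cons, ih]
    unfold aOuterBody
    exact length_foldl_aBody _ _ _ _ dp

-- Python's xs[-1] on a nonempty list is its last element
theorem pyGetD_neg_one (l : List (List Int)) (h : l ≠ []) :
    PySem.List.pyGetD l (-1) [] = l.getD (l.length - 1) [] := by
  have h1 : 1 ≤ l.length := List.length_pos_iff.mpr h
  simp [PySem.List.pyGetD, PySem.List.pyGet?, PySem.List.pyIdx?, h1, List.getD_eq_getElem?_getD]

-- the same for an Int row (B's best[-1])
theorem pyGetD_neg_one_int (l : List Int) (h : l ≠ []) :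
    PySem.List.pyGetD l (-1) 0 = l.getD (l.length - 1) 0 := by
  have h1 : 1 ≤ l.length := List.length_pos_iff.mpr h
  simp [PySem.List.pyGetD, PySem.List.pyGet?, PySem.List.pyIdx?, h1, List.getD_eq_getElem?_getD]

-- running minimum of the first j+1 entries of a row
def prefMin (l : List Int) : Nat → Int
  | 0 => l.getD 0 0
  | j+1 => min (prefMin l j) (l.getD (j+1) 0)

theorem getD_stepFun (row : List Int) (a b : Int) (j : Nat) (hj : j < row.length) :
    (stepFun row a b).getD j 0 =
      if (j : Int) < b then row.getD j 0 + a
      else min (row.getD j 0 + a) (row.getD (j - b.toNat) 0) := by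
  unfold stepFun
  rw [List.getD_eq_getElem _ _ (by simpa using hj)]
  simp

theorem getD_bStepFun (best : List Int) (a b : Int) (j : Nat) (hj : j < best.length) :
    (bStepFun best a b).getD j 0 =
      if (j : Int) < b then best.getD j 0
      else max (best.getD j 0) (best.getD (j - b.toNat) 0 + a) := by
  unfold bStepFun
  rw [List.getD_eq_getElem _ _ (by simpa using hj)]
  simp

-- how one A-step transforms the prefix minima
theorem prefMin_stepFun (row : List Int) (a b : Int) (hb : 0 ≤ b) :
    ∀ j, j < row.length →
      prefMin (stepFun row a b) j =
        if (j : Int) < b then prefMin row j + a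
        else min (prefMin row j + a) (prefMin row (j - b.toNat)) := by
  intro j
  induction j with
  | zero =>
    intro hj
    rw [show prefMin (stepFun row a b) 0 = (stepFun row a b).getD 0 0 from rfl,
      getD_stepFun row a b 0 hj, Nat.zero_sub,
      show prefMin row 0 = row.getD 0 0 from rfl]
  | succ j ih =>
    intro hj
    have hjlt : j < row.length := by omega
    rw [show prefMin (stepFun row a b) (j+1)
        = min (prefMin (stepFun row a b) j) ((stepFun row a b).getD (j+1) 0) from rfl,
      ih hjlt, getD_stepFun row a b (j+1) hj,
      show (((j+1 : Nat)) : Int) = (j : Int) + 1 by push_cast; ring]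
    by_cases hc1 : ((j : Int) + 1) < b
    · rw [if_pos (show (j : Int) < b by omega), if_pos hc1, if_pos hc1,
        show prefMin row (j+1) = min (prefMin row j) (row.getD (j+1) 0) from rfl]
      omega
    · rw [if_neg hc1, if_neg hc1]
      by_cases hc2 : (j : Int) < b
      · -- here b = j+1, so the shifted read is row[0]
        have hbj : b.toNat = j + 1 := by omega
        rw [if_pos hc2, hbj, Nat.sub_self,
          show prefMin row (j+1) = min (prefMin row j) (row.getD (j+1) 0) from rfl,
          show prefMin row 0 = row.getD 0 0 from rfl]
        omega
      · rw [if_neg hc2,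
          show j + 1 - b.toNat = (j - b.toNat) + 1 by omega,
          show prefMin row (j+1) = min (prefMin row j) (row.getD (j+1) 0) from rfl,
          show prefMin row ((j - b.toNat)+1)
            = min (prefMin row (j - b.toNat)) (row.getD ((j - b.toNat)+1) 0) from rfl]
        omega

-- the core invariant: A's prefix minima are the running total minus B's knapsack row
theorem fold_inv (m : Nat) (mI : Int) (hmI : mI.toNat = m) (hm0 : 0 ≤ mI) :
    ∀ (items : List (List Int)), (∀ r ∈ items, r.length = 2 ∧ 0 ≤ r.getD 1 0) →
    ∀ (rowA best : List Int) (t : Int),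
      rowA.length = m → best.length = m →
      (∀ j < m, prefMin rowA j = t - best.getD j 0) →
      (∀ j < m, prefMin (items.foldl aStep rowA) j
        = (t + (items.map (fun r => PySem.List.pyGetD r 0 0)).sum)
          - (items.foldl (bKnapStep mI) best).getD j 0)
      ∧ (items.foldl aStep rowA).length = m
      ∧ (items.foldl (bKnapStep mI) best).length = m := by
  intro items
  induction items with
  | nil =>
    intro _ rowA best t hlA hlB hinv
    refine ⟨?_, hlA, hlB⟩
    intro j hj
    simpa using hinv j hj
  | cons item rest ih =>
    intro hpre rowA best t hlA hlB hinv
    obtain ⟨hlen2, hb⟩ := hpre item (List.mem_cons_self)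
    have hb' : 0 ≤ PySem.List.pyGetD item 1 0 := by
      rw [PySem.List.pyGetD_ofNat']; exact hb
    set a := PySem.List.pyGetD item 0 0 with ha
    set b := PySem.List.pyGetD item 1 0 with hbdef
    simp only [List.foldl_cons, List.map_cons, List.sum_cons]
    rw [bKnapStep_eq_bStepFun mI best item (by omega) hm0 hb']
    have hstep : ∀ j < m, prefMin (aStep rowA item) j = (t + a) - (bStepFun best a b).getD j 0 := by
      intro j hj
      rw [aStep, ← ha, ← hbdef, prefMin_stepFun rowA a b hb' j (by omega),
        getD_bStepFun best a b j (by omega)]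
      by_cases hc : (j : Int) < b
      · rw [if_pos hc, if_pos hc, hinv j hj]
        ring
      · rw [if_neg hc, if_neg hc, hinv j hj,
          hinv (j - b.toNat) (by omega)]
        omega
    have := ih (fun r hr => hpre r (List.mem_cons_of_mem _ hr))
      (aStep rowA item) (bStepFun best a b) (t + a)
      (by rw [aStep, length_stepFun, hlA]) (by rw [length_bStepFun, hlB]) hstep
    refine ⟨?_, this.2.1, this.2.2⟩
    intro j hj
    rw [this.1 j hj, ← ha, ← hbdef]
    ring

-- min(l) as the full prefix minimum
theorem foldl_min_eq_prefMin : ∀ (t : List Int) (x : Int), t.foldl min x = prefMin (x :: t) t.length := by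
  intro t
  induction t with
  | nil => intro x; simp [prefMin]
  | cons y t' ih =>
    intro x
    rw [List.foldl_cons, ih (min x y)]
    have key : ∀ j, prefMin (min x y :: t') j = prefMin (x :: y :: t') (j + 1) := by
      intro j
      induction j with
      | zero => simp [prefMin]
      | succ j ihj =>
        show min (prefMin (min x y :: t') j) ((min x y :: t').getD (j+1) 0) =
          min (prefMin (x :: y :: t') (j+1)) ((x :: y :: t').getD (j+2) 0)
        rw [ihj]
        rfl
    rw [key]
    rfl

-- A's row-0 prefix minima are all 0
theorem prefMin_init (k : Nat) : ∀ j ≤ k, prefMin ((0 : Int) :: List.replicate k 2147483647) j = 0 := by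
  intro j
  induction j with
  | zero => intro _; simp [prefMin]
  | succ j ih =>
    intro hj
    unfold prefMin
    rw [ih (by omega)]
    have : ((0 : Int) :: List.replicate k (2147483647 : Int)).getD (j+1) 0 = 2147483647 := by
      show (List.replicate k (2147483647 : Int)).getD j 0 = 2147483647
      rw [List.getD_eq_getElem _ _ (by simpa using hj)]
      simp
    rw [this]
    decide

-- ===== VERDICT (by name: the statement is the Claim_ definition above) =====
theorem solution_spec : Claim_equal_solution := by
  intro info n m hdom hpre
  obtain ⟨hm, hpre2⟩ := hpre
  unfold Spec_solution solution solution_alt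
  dsimp only
  set INF : Int := 2147483647 with hINF
  set row0 : List Int := 0 :: List.replicate (m - 1).toNat INF with hrow0
  set dp0 : List (List Int) :=
    (PySem.List.pyRange 0 ((info.length : Int) + 1) 1).map
      (fun _ => (PySem.List.pyRange 0 m 1).map (fun _ => INF)) with hdp0
  -- basic facts about the initial table
  have hlen0 : dp0.length = info.length + 1 := by
    rw [hdp0, List.length_map, PySem.List.length_pyRange_one]; omega
  have hrowINF : (PySem.List.pyRange 0 m 1).map (fun _ => INF) = List.replicate m.toNat INF := by
    apply List.eq_replicate_iff.mpr
    constructor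
    · rw [List.length_map, PySem.List.length_pyRange_one]; omega
    · intro x hx
      rcases List.mem_map.mp hx with ⟨y, _, hy⟩
      exact hy.symm
  have hrows0 : ∀ r ∈ dp0, r.length = m.toNat := by
    intro r hr
    rcases List.mem_map.mp hr with ⟨y, _, hy⟩
    rw [← hy, hrowINF, List.length_replicate]
  have hm1 : m.toNat = (m - 1).toNat + 1 := by omega
  have hinit : pySet2 dp0 0 0 0 = dp0.set 0 row0 := by
    unfold pySet2 pySet1
    rw [if_pos (by constructor <;> omega)]
    have hg : dp0.getD (Int.toNat 0) [] = (PySem.List.pyRange 0 m 1).map (fun _ => INF) := by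
      rw [show Int.toNat 0 = 0 from rfl, List.getD_eq_getElem _ _ (by omega)]
      simp [hdp0]
    rw [hg, hrowINF]
    rw [if_pos (by refine ⟨by omega, ?_⟩; rw [List.length_replicate]; omega)]
    rw [hm1, List.replicate_succ, show Int.toNat 0 = 0 from rfl, List.set_cons_zero, hrow0]
  rw [hinit]
  have hr0len : row0.length = m.toNat := by rw [hrow0]; simp; omega
  -- the outer loop: the last row of the table is the fold of aStep over info
  have houter := aOuter_loop m.toNat info row0 hpre2 info.length 0 (dp0.set 0 row0)
    (by omega) (by omega) (by simpa using hlen0)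
    (by intro r hr
        rcases List.mem_or_eq_of_mem_set hr with h | h
        · exact hrows0 r h
        · rw [h]; exact hr0len)
    (by rw [List.take_zero, List.foldl_nil, List.getD_eq_getElem _ _ (by simp; omega)]
        simp [hrow0])
  rw [Int.toNat_of_nonneg (by omega : (0:Int) ≤ m)] at houter
  simp only [Nat.cast_zero] at houter
  -- read off dp[-1]
  set dpF := (PySem.List.pyRange 0 ((info.length : Int)) 1).foldl (aOuterBody info m) (dp0.set 0 row0) with hdpF
  have hlenF : dpF.length = info.length + 1 := by
    rw [hdpF, length_foldl_aOuterBody]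
    simpa using hlen0
  have hne : dpF ≠ [] := by
    intro hnil
    rw [hnil] at hlenF
    simp at hlenF
  rw [pyGetD_neg_one dpF hne]
  rw [show dpF.length - 1 = info.length by omega]
  rw [houter]
  -- the invariant at the final rows
  have hinv0 : ∀ j < m.toNat, prefMin row0 j = 0 - (List.replicate m.toNat (0:Int)).getD j 0 := by
    intro j hj
    rw [List.getD_eq_getElem _ _ (by simpa using hj)]
    simp only [List.getElem_replicate]
    rw [hrow0, hINF]
    rw [prefMin_init ((m-1).toNat) j (by omega)]
    ring
  obtain ⟨hinvF, hlenA, hlenB⟩ := fold_inv m.toNat m rfl (by omega) info hpre2 row0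
    (List.replicate m.toNat 0) 0 hr0len (by simp) hinv0
  set finalA := info.foldl aStep row0 with hfinalA
  set finalB := info.foldl (bKnapStep m) (List.replicate m.toNat (0:Int)) with hfinalB
  -- min(finalA)
  have hAne : finalA ≠ [] := by
    intro hnil; rw [hnil] at hlenA; simp at hlenA; omega
  obtain ⟨x, tl, hxtl⟩ := List.exists_cons_of_ne_nil hAne
  rw [hxtl, PySem.List.min?_id_cons]
  simp only [Option.getD_some]
  rw [foldl_min_eq_prefMin tl x, ← hxtl]
  have htl : tl.length = m.toNat - 1 := by
    rw [hxtl] at hlenA; simp at hlenA; omega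
  rw [htl]
  -- B's best[-1]
  have hBne : finalB ≠ [] := by
    intro hnil; rw [hnil] at hlenB; simp at hlenB; omega
  have hBval : PySem.List.pyGetD finalB (-1) 0 = finalB.getD (m.toNat - 1) 0 := by
    rw [pyGetD_neg_one_int finalB hBne, hlenB]
  have hkey : prefMin finalA (m.toNat - 1)
      = (List.map (fun r => PySem.List.pyGetD r 0 0) info).sum - finalB.getD (m.toNat - 1) 0 := by
    rw [hinvF (m.toNat - 1) (by omega)]
    ring
  rw [hkey, hBval]
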